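-- pv_equiv track=rewrite | github.com/Mehvix/AP-CSP | Unit 1: Programming in Python/list_loop.py | check_negatives
-- ===== SOURCE A (Python) =====
-- def check_negatives(sentence=""):
--     negativeList = ["sad", "mad", "angry", "disgusting", "ugly", "pie", "stupid", "stinky", "grotesque"]
--
--     numberOfNegatives = 0
--
--     sentenceList = sentence.split(" ")
--
--     for i in range(len(sentenceList)):
--         if sentenceList[i] in negativeList:
--             numberOfNegatives += 1
--
--     return numberOfNegatives
-- ===== SOURCE B (Python) =====
-- def check_negatives(sentence=""):
--     negativeList = ["sad", "mad", "angry", "disgusting", "ugly", "pie", "stupid", "stinky", "grotesque"]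
--
--     counts = {}
--     for word in sentence.split(" "):
--         counts[word] = counts.get(word, 0) + 1
--
--     total = 0
--     for word in negativeList:
--         total += counts.get(word, 0)
--     return total
-- ===== Notes on version B (the rewrite author's own statement) =====
-- stated objective: alternative
-- what changed: B builds a word-frequency dictionary from the sentence in one pass and then sums the counts of the nine fixed negative words by dictionary lookup, instead of A's index loop over the sentence words testing each against the negative list.
import Mathlib
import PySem

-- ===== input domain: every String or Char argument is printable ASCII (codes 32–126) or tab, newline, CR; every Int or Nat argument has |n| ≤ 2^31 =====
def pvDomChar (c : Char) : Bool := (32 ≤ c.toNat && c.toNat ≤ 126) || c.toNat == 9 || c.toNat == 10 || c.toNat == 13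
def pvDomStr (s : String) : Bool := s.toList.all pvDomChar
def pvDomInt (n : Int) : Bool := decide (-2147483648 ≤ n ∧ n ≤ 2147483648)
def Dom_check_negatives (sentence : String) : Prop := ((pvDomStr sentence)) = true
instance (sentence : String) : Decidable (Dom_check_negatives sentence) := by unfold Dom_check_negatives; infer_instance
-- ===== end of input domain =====

-- B replaces A's index loop over the sentence words by a one-pass word-frequency
-- dictionary summed over the nine fixed negative words (objective: alternative).

-- ===== PORT A =====
def pvNegList : List (List Char) :=
  ["sad".toList, "mad".toList, "angry".toList, "disgusting".toList, "ugly".toList,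
   "pie".toList, "stupid".toList, "stinky".toList, "grotesque".toList]

def check_negatives (sentence : String) : Int :=
  let sentenceList := PySem.Chars.splitOn sentence.toList " ".toList
  (PySem.List.pyRange 0 (sentenceList.length : Int) 1).foldl
    (fun acc i =>
      if pvNegList.contains (PySem.List.pyGetD sentenceList i []) then acc + 1 else acc) 0

-- ===== PORT B =====
def check_negatives_alt (sentence : String) : Int :=
  let counts : PySem.Dict (List Char) Int :=
    (PySem.Chars.splitOn sentence.toList " ".toList).foldl
      (fun d w => d.insert w (d.getD w 0 + 1)) PySem.Dict.empty
  pvNegList.foldl (fun total w => total + counts.getD w 0) 0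

-- ===== PRECONDITION & SPEC =====
def Spec_check_negatives (sentence : String) (out : Int) : Prop := out = check_negatives_alt sentence
instance (sentence : String) (out : Int) : Decidable (Spec_check_negatives sentence out) := by unfold Spec_check_negatives; infer_instance

-- ===== CLAIM (what is proved, stated in full; the proofs are below) =====
def Claim_equal_check_negatives : Prop := ∀ (sentence : String), Dom_check_negatives sentence → Spec_check_negatives sentence (check_negatives sentence)

-- ===== LEMMAS AND PROOFS =====

-- A 0/1 indicator summed along a duplicate-free list is a membership test.
lemma sum_map_ite_eq_mem (L : List (List Char)) (hL : L.Nodup) (x : List Char) :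
    (L.map (fun w => if x = w then (1 : Int) else 0)).sum = if x ∈ L then 1 else 0 := by
  induction L with
  | nil => simp
  | cons y L ih =>
    obtain ⟨hy, hL'⟩ := List.nodup_cons.mp hL
    simp only [List.map_cons, List.sum_cons, ih hL']
    by_cases h : x = y
    · subst h; simp [hy]
    · simp [h]

-- Summing, over a duplicate-free list L, the occurrence count in ws of each
-- element of L equals counting the members of ws that lie in L.
lemma sum_map_count_eq_countP (L : List (List Char)) (hL : L.Nodup) (ws : List (List Char)) :
    (L.map (fun w => (ws.count w : Int))).sum
      = (ws.countP (fun w => L.contains w) : Int) := by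
  induction ws with
  | nil => simp
  | cons x ws ih =>
    have hmap : L.map (fun w => (((x :: ws).count w : Nat) : Int))
        = L.map (fun w => (ws.count w : Int) + if x = w then (1 : Int) else 0) := by
      apply List.map_congr_left
      intro w _
      rw [List.count_cons]
      push_cast
      simp
    rw [hmap, PySem.List.sum_map_add_int, ih, sum_map_ite_eq_mem L hL x,
        List.countP_cons]
    by_cases h : x ∈ L <;> simp [h, List.contains_eq_mem]

-- ===== VERDICT (by name: the statement is the Claim_ definition above) =====
theorem check_negatives_spec : Claim_equal_check_negatives := by
  intro sentence _
  unfold Spec_check_negatives check_negatives check_negatives_alt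
  set ws := PySem.Chars.splitOn sentence.toList " ".toList with hws
  rw [PySem.List.foldl_pyRange_pyGetD' ws []
        (fun acc w => if pvNegList.contains w then acc + 1 else acc) 0 (le_refl 0),
      Int.toNat_zero, List.drop_zero,
      PySem.List.foldl_if_add_one (fun w => pvNegList.contains w) ws 0,
      PySem.List.foldl_add pvNegList (fun w =>
        (ws.foldl (fun d x => d.insert x (d.getD x 0 + 1)) PySem.Dict.empty).getD w 0) 0]
  have hcounts : pvNegList.map (fun w =>
      (ws.foldl (fun d x => d.insert x (d.getD x 0 + 1)) PySem.Dict.empty).getD w 0)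
      = pvNegList.map (fun w => (ws.count w : Int)) := by
    apply List.map_congr_left
    intro w _
    rw [PySem.Dict.getD_foldl_insert_add_one]
    simp [PySem.Dict.empty, PySem.Dict.getD, PySem.Dict.get?]
  rw [hcounts, sum_map_count_eq_countP pvNegList (by decide) ws]
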